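-- pv_equiv track=rewrite | github.com/Morgan11-tech/Leveraging-Machine-Learning-for-Precision-Medicine-in-Ghana | interface/web-app.py | filter_known_associations
-- ===== SOURCE A (Python) =====
-- def filter_known_associations(drug_name, potential_diseases, drug_gene_associations, disease_gene_associations, genes_of_interest):
--     novel_associations = []
--     drug_genes = set(gene for drug, gene in drug_gene_associations if drug == drug_name)
--
--     for disease, score in potential_diseases:
--         disease_genes = set(gene for dis, gene in disease_gene_associations if dis == disease)
--
--         # If there's no overlap in genes and the disease is not a gene of interest, consider it a novel association
--         if not drug_genes.intersection(disease_genes) and disease not in genes_of_interest: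
--             novel_associations.append((disease, score))
--
--     return novel_associations
-- ===== SOURCE B (Python) =====
-- def filter_known_associations(drug_name, potential_diseases, drug_gene_associations, disease_gene_associations, genes_of_interest):
--     # stage 1: the drug's genes
--     drug_genes = set()
--     for drug, gene in drug_gene_associations:
--         if drug == drug_name:
--             drug_genes.add(gene)
--     # stage 2: diseases sharing at least one gene with the drug (no per-disease rescan, no intersection)
--     overlap = set()
--     for dis, gene in disease_gene_associations:
--         if gene in drug_genes:
--             overlap.add(dis)
--     # stage 3: flat filter of the candidates
--     novel = []
--     for disease, score in potential_diseases:
--         if disease not in overlap and disease not in genes_of_interest: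
--             novel.append((disease, score))
--     return novel
-- ===== Notes on version B (the rewrite author's own statement) =====
-- stated objective: alternative
-- what changed: B builds, in one left-to-right pass over disease_gene_associations, the set of diseases sharing a gene with the drug, then flat-filters potential_diseases by membership; A instead rescans disease_gene_associations and computes a set intersection for every candidate disease.
import Mathlib
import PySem

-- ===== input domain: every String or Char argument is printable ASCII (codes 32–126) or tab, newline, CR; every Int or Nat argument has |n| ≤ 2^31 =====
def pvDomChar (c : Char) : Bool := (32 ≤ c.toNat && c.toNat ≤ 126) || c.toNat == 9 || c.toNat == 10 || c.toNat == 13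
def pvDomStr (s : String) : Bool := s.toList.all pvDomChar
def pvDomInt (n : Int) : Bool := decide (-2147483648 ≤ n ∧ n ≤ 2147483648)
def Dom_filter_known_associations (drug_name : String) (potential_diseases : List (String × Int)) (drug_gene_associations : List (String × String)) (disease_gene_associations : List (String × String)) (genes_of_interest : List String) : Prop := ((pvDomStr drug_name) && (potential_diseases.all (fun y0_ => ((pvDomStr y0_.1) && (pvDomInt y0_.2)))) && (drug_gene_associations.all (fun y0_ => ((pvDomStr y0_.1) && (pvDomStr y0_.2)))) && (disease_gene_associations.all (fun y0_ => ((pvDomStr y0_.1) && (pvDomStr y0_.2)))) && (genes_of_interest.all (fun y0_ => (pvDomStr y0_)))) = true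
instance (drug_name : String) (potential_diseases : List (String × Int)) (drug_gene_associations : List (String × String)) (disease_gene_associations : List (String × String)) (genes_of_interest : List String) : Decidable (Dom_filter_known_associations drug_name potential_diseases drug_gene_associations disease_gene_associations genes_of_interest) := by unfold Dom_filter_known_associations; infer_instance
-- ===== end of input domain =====

-- B removes A's per-candidate rescan + intersection: one pass indexes the diseases
-- sharing a gene with the drug, then a flat membership filter over the candidates.


-- ===== PORT A =====
def filter_known_associations (drug_name : String) (potential_diseases : List (String × Int)) (drug_gene_associations : List (String × String)) (disease_gene_associations : List (String × String)) (genes_of_interest : List String) : List (String × Int) :=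
  let drug_genes : PySem.Set String :=
    PySem.Set.ofList ((drug_gene_associations.filter (fun p => p.1 == drug_name)).map Prod.snd)
  potential_diseases.foldl (fun novel p =>
    let disease_genes : PySem.Set String :=
      PySem.Set.ofList ((disease_gene_associations.filter (fun q => q.1 == p.1)).map Prod.snd)
    if (PySem.Set.inter drug_genes disease_genes).isEmpty && !(genes_of_interest.contains p.1) then
      novel ++ [p]
    else novel) []

-- ===== PORT B =====
-- stage 1: the drug's genes (explicit loop with set.add)
def pvBDrugGenes (drug_name : String) : List (String × String) → PySem.Set String → PySem.Set String
  | [], s => s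
  | (drug, gene) :: rest, s =>
      pvBDrugGenes drug_name rest (if drug == drug_name then PySem.Set.add s gene else s)

-- stage 2: diseases sharing at least one gene with the drug
def pvBOverlap (dg : PySem.Set String) : List (String × String) → PySem.Set String → PySem.Set String
  | [], s => s
  | (dis, gene) :: rest, s =>
      pvBOverlap dg rest (if PySem.Set.contains dg gene then PySem.Set.add s dis else s)

-- stage 3: flat filter of the candidates
def pvBCollect (overlap : PySem.Set String) (genes_of_interest : List String) : List (String × Int) → List (String × Int)
  | [] => []
  | (disease, score) :: rest =>
      if !(PySem.Set.contains overlap disease) && !(genes_of_interest.contains disease) then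
        (disease, score) :: pvBCollect overlap genes_of_interest rest
      else
        pvBCollect overlap genes_of_interest rest

def filter_known_associations_alt (drug_name : String) (potential_diseases : List (String × Int)) (drug_gene_associations : List (String × String)) (disease_gene_associations : List (String × String)) (genes_of_interest : List String) : List (String × Int) :=
  let drug_genes := pvBDrugGenes drug_name drug_gene_associations PySem.Set.empty
  let overlap := pvBOverlap drug_genes disease_gene_associations PySem.Set.empty
  pvBCollect overlap genes_of_interest potential_diseases

-- ===== PRECONDITION & SPEC =====
def Spec_filter_known_associations (drug_name : String) (potential_diseases : List (String × Int)) (drug_gene_associations : List (String × String)) (disease_gene_associations : List (String × String)) (genes_of_interest : List String) (out : List (String × Int)) : Prop := out = filter_known_associations_alt drug_name potential_diseases drug_gene_associations disease_gene_associations genes_of_interest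
instance (drug_name : String) (potential_diseases : List (String × Int)) (drug_gene_associations : List (String × String)) (disease_gene_associations : List (String × String)) (genes_of_interest : List String) (out : List (String × Int)) : Decidable (Spec_filter_known_associations drug_name potential_diseases drug_gene_associations disease_gene_associations genes_of_interest out) := by unfold Spec_filter_known_associations; infer_instance

-- ===== CLAIM =====
def Claim_equal_filter_known_associations : Prop := ∀ (drug_name : String) (potential_diseases : List (String × Int)) (drug_gene_associations : List (String × String)) (disease_gene_associations : List (String × String)) (genes_of_interest : List String), Dom_filter_known_associations drug_name potential_diseases drug_gene_associations disease_gene_associations genes_of_interest → Spec_filter_known_associations drug_name potential_diseases drug_gene_associations disease_gene_associations genes_of_interest (filter_known_associations drug_name potential_diseases drug_gene_associations disease_gene_associations genes_of_interest)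

-- ===== LEMMAS AND PROOFS =====

theorem pv_mem_bDrugGenes (drug_name : String) (l : List (String × String)) (s : PySem.Set String) (x : String) :
    x ∈ pvBDrugGenes drug_name l s ↔ x ∈ s ∨ ∃ q ∈ l, q.1 = drug_name ∧ q.2 = x := by
  induction l generalizing s with
  | nil => simp [pvBDrugGenes]
  | cons h t ih =>
    obtain ⟨d, g⟩ := h
    simp only [pvBDrugGenes, ih]
    by_cases hd : d == drug_name <;> simp [hd, PySem.Set.mem_add] <;> aesop

theorem pv_mem_bOverlap (dg : PySem.Set String) (l : List (String × String)) (s : PySem.Set String) (x : String) :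
    x ∈ pvBOverlap dg l s ↔ x ∈ s ∨ ∃ q ∈ l, q.2 ∈ dg ∧ q.1 = x := by
  induction l generalizing s with
  | nil => simp [pvBOverlap]
  | cons h t ih =>
    obtain ⟨d, g⟩ := h
    simp only [pvBOverlap, ih]
    by_cases hg : PySem.Set.contains dg g <;>
      simp at * <;> aesop

theorem pv_bCollect_eq_filter (overlap : PySem.Set String) (goi : List String) (l : List (String × Int)) :
    pvBCollect overlap goi l
      = l.filter (fun p => !(PySem.Set.contains overlap p.1) && !(goi.contains p.1)) := by
  induction l with
  | nil => rfl
  | cons h t ih =>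
    obtain ⟨d, sc⟩ := h
    simp only [pvBCollect, ih, List.filter_cons]

-- A's per-candidate "intersection empty" test equals B's "not in the overlap set" test.
theorem pv_cond_eq (drug_name : String) (dga dis : List (String × String)) (d : String) :
    (PySem.Set.inter
        (PySem.Set.ofList ((dga.filter (fun p => p.1 == drug_name)).map Prod.snd))
        (PySem.Set.ofList ((dis.filter (fun q => q.1 == d)).map Prod.snd))).isEmpty
    = !(PySem.Set.contains
        (pvBOverlap (pvBDrugGenes drug_name dga PySem.Set.empty) dis PySem.Set.empty) d) := by
  rw [Bool.eq_iff_iff]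
  simp only [List.isEmpty_iff, List.eq_nil_iff_forall_not_mem, Bool.not_eq_true',
    PySem.Set.contains_iff, ← Bool.not_eq_true, PySem.Set.mem_inter,
    PySem.Set.mem_ofList, List.mem_map, List.mem_filter, pv_mem_bOverlap,
    pv_mem_bDrugGenes, PySem.Set.empty]
  aesop

-- ===== VERDICT =====
theorem filter_known_associations_spec : Claim_equal_filter_known_associations := by
  intro drug_name potential_diseases drug_gene_associations disease_gene_associations genes_of_interest _
  unfold Spec_filter_known_associations filter_known_associations filter_known_associations_alt
  rw [PySem.List.foldl_append_ite_eq_filter, List.nil_append, pv_bCollect_eq_filter]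
  apply List.filter_congr
  intro p _
  rw [pv_cond_eq]
  simp
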